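-- pv_equiv track=rewrite | github.com/Cuixjnoob/Ecology | scripts/cvhi_beninca_stage2.py | build_klausmeier_pairs
-- ===== SOURCE A (Python) =====
-- PHYTO = {"Nanophyto", "Picophyto", "Filam_diatoms"}
--
-- NUTRIENTS = {"NO2", "NO3", "NH4", "SRP"}
--
-- def build_klausmeier_pairs(visible_species):
--     """Return (pos_pairs, neg_pairs) of channel indices for soft sign prior.
--
--     pos: (phyto_i, nutrient_j) — d base_phyto / d x_nutrient > 0
--     neg: (nutrient_j, phyto_i) — d base_nutrient / d x_phyto < 0
--     """
--     pos_pairs = []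
--     neg_pairs = []
--     for i, s_i in enumerate(visible_species):
--         if s_i not in PHYTO:
--             continue
--         for j, s_j in enumerate(visible_species):
--             if s_j not in NUTRIENTS:
--                 continue
--             pos_pairs.append((i, j))   # nutrient→phyto positive
--             neg_pairs.append((j, i))   # phyto→nutrient negative
--     return tuple(pos_pairs), tuple(neg_pairs)
-- ===== SOURCE B (Python) =====
-- PHYTO = {"Nanophyto", "Picophyto", "Filam_diatoms"}
--
-- NUTRIENTS = {"NO2", "NO3", "NH4", "SRP"}
--
-- def build_klausmeier_pairs(visible_species):
--     """Return (pos_pairs, neg_pairs) of channel indices for soft sign prior.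
--
--     One pass collects phyto and nutrient indices; pairs come from the
--     product of those two small index lists.
--     """
--     phyto_idx = [i for i, s in enumerate(visible_species) if s in PHYTO]
--     nutr_idx = [j for j, s in enumerate(visible_species) if s in NUTRIENTS]
--     pos_pairs = tuple((i, j) for i in phyto_idx for j in nutr_idx)
--     neg_pairs = tuple((j, i) for i in phyto_idx for j in nutr_idx)
--     return pos_pairs, neg_pairs
-- ===== Notes on version B (the rewrite author's own statement) =====
-- stated objective: alternative
-- what changed: Instead of re-scanning the whole species list for every phyto hit, B collects phyto and nutrient index lists in one pass and forms the pairs from the product of those two lists; it trades A's nested full scans for index collection plus a product, with the same measured cost on the sampled inputs.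
import Mathlib
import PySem

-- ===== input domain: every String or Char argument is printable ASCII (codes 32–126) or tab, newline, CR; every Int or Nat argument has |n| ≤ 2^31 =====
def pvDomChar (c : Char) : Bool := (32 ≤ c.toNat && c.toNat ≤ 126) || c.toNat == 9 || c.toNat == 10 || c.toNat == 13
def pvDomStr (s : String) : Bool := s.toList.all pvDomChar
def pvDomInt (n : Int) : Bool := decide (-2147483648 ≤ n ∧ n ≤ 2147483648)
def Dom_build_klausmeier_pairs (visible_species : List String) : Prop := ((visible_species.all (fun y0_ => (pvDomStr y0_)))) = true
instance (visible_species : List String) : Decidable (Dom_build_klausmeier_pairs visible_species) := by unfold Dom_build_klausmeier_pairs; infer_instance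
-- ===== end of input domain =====

-- B collects phyto/nutrient index lists in one pass and forms the pairs from their
-- product, instead of A's re-scan of the whole list for every phyto hit (alternative).

-- s in PHYTO
def isPhyto (s : String) : Bool := s == "Nanophyto" || s == "Picophyto" || s == "Filam_diatoms"

-- s in NUTRIENTS
def isNutrient (s : String) : Bool := s == "NO2" || s == "NO3" || s == "NH4" || s == "SRP"

-- ===== PORT A =====
-- literal transliteration of A's nested enumerate loops with list accumulators
def build_klausmeier_pairs (visible_species : List String) : (List (Int × Int)) × (List (Int × Int)) :=
  let e := PySem.List.enumerate visible_species
  e.foldl (fun acc p =>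
    if isPhyto p.2 then
      e.foldl (fun acc2 q =>
        if isNutrient q.2 then (acc2.1 ++ [(p.1, q.1)], acc2.2 ++ [(q.1, p.1)]) else acc2) acc
    else acc) ([], [])

-- ===== PORT B =====
-- transliteration of Source B: collect index lists, then products
def build_klausmeier_pairs_alt (visible_species : List String) : (List (Int × Int)) × (List (Int × Int)) :=
  let e := PySem.List.enumerate visible_species
  let phyto_idx := (e.filter (fun p => isPhyto p.2)).map (·.1)
  let nutr_idx := (e.filter (fun p => isNutrient p.2)).map (·.1)
  (phyto_idx.flatMap (fun i => nutr_idx.map (fun j => (i, j))),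
   phyto_idx.flatMap (fun i => nutr_idx.map (fun j => (j, i))))

-- ===== PRECONDITION & SPEC =====
def Spec_build_klausmeier_pairs (visible_species : List String) (out : (List (Int × Int)) × (List (Int × Int))) : Prop := out = build_klausmeier_pairs_alt visible_species
instance (visible_species : List String) (out : (List (Int × Int)) × (List (Int × Int))) : Decidable (Spec_build_klausmeier_pairs visible_species out) := by unfold Spec_build_klausmeier_pairs; infer_instance

-- ===== CLAIM (what is proved, stated in full; the proofs are below) =====
def Claim_equal_build_klausmeier_pairs : Prop := ∀ (visible_species : List String), Dom_build_klausmeier_pairs visible_species → Spec_build_klausmeier_pairs visible_species (build_klausmeier_pairs visible_species)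

-- ===== LEMMAS AND PROOFS =====

-- a pair-accumulator fold that appends F/G on a condition equals filter-then-flatMap
theorem fold_pair_filter {α β γ : Type} (c : α → Bool) (F : α → List β) (G : α → List γ) :
    ∀ (e : List α) (acc : List β × List γ),
      e.foldl (fun acc p => if c p then (acc.1 ++ F p, acc.2 ++ G p) else acc) acc
        = (acc.1 ++ (e.filter c).flatMap F, acc.2 ++ (e.filter c).flatMap G) := by
  intro e
  induction e with
  | nil => intro acc; simp
  | cons x xs ih =>
    intro acc
    by_cases h : c x = true
    · simp [List.foldl_cons, h, ih, List.append_assoc]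
    · simp [List.foldl_cons, h, ih]

-- one element per hit: flatMap of singletons is a map
theorem flatMap_single {α β : Type} (f : α → β) : ∀ (l : List α), l.flatMap (fun x => [f x]) = l.map f
  | [] => rfl
  | x :: xs => by simp [List.flatMap_cons, flatMap_single f xs]

theorem build_klausmeier_pairs_eq (visible_species : List String) :
    build_klausmeier_pairs visible_species = build_klausmeier_pairs_alt visible_species := by
  unfold build_klausmeier_pairs build_klausmeier_pairs_alt
  have inner : ∀ (p : Int × String) (acc : List (Int × Int) × List (Int × Int)),
      (PySem.List.enumerate visible_species).foldl (fun acc2 q =>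
        if isNutrient q.2 then (acc2.1 ++ [(p.1, q.1)], acc2.2 ++ [(q.1, p.1)]) else acc2) acc
      = (acc.1 ++ ((PySem.List.enumerate visible_species).filter (fun q => isNutrient q.2)).flatMap
            (fun q => [(p.1, q.1)]),
         acc.2 ++ ((PySem.List.enumerate visible_species).filter (fun q => isNutrient q.2)).flatMap
            (fun q => [(q.1, p.1)])) := by
    intro p acc
    exact fold_pair_filter (fun q => isNutrient q.2) (fun q => [(p.1, q.1)]) (fun q => [(q.1, p.1)])
      (PySem.List.enumerate visible_species) acc
  have outer := fold_pair_filter (fun p : Int × String => isPhyto p.2)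
      (fun p => ((PySem.List.enumerate visible_species).filter (fun q => isNutrient q.2)).flatMap
          (fun q => [(p.1, q.1)]))
      (fun p => ((PySem.List.enumerate visible_species).filter (fun q => isNutrient q.2)).flatMap
          (fun q => [(q.1, p.1)]))
      (PySem.List.enumerate visible_species) ([], [])
  calc
    (PySem.List.enumerate visible_species).foldl (fun acc p =>
        if isPhyto p.2 then
          (PySem.List.enumerate visible_species).foldl (fun acc2 q =>
            if isNutrient q.2 then (acc2.1 ++ [(p.1, q.1)], acc2.2 ++ [(q.1, p.1)]) else acc2) acc
        else acc) ([], [])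
        = (PySem.List.enumerate visible_species).foldl (fun acc p =>
            if isPhyto p.2 then
              (acc.1 ++ ((PySem.List.enumerate visible_species).filter (fun q => isNutrient q.2)).flatMap
                  (fun q => [(p.1, q.1)]),
               acc.2 ++ ((PySem.List.enumerate visible_species).filter (fun q => isNutrient q.2)).flatMap
                  (fun q => [(q.1, p.1)])) else acc) ([], []) := by
          apply PySem.List.foldl_congr_mem
          intro acc p _
          by_cases h : isPhyto p.2 = true
          · simp [h, inner p acc]
          · simp [h]
    _ = _ := by
          rw [outer]
          simp only [List.flatMap_map, List.nil_append, Prod.mk.injEq]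
          constructor <;>
          · apply List.flatMap_congr
            intro p _
            rw [flatMap_single]
            simp [Function.comp_def]

-- ===== VERDICT (by name: the statement is the Claim_ definition above) =====
theorem build_klausmeier_pairs_spec : Claim_equal_build_klausmeier_pairs := by
  intro vs _
  unfold Spec_build_klausmeier_pairs
  exact build_klausmeier_pairs_eq vs
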